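-- pv_equiv track=rewrite | github.com/shadesdhiman/InterviewBit-Solutions | Heaps and Maps/Profit Maximisation.py | solve
-- ===== SOURCE A (Python) =====
-- def solve(A, B):
--     import heapq
--     H = []
--     heapq.heapify(H)
--     for i in range(len(A)):
--         heapq.heappush(H, -1 * A[i])
--     profit = 0
--     for i in range(B):
--         x= -1*heapq.heappop(H)
--         profit+=x
--         x=x-1
--         heapq.heappush(H, -x)
--     return profit
-- ===== SOURCE B (Python) =====
-- def solve(A, B):
--     # Sort counts descending and batch equal-level picks with arithmetic-series sums.
--     if B <= 0 or not A:
--         return 0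
--     a = sorted(A, reverse=True)
--     profit = 0
--     k = B
--     c = 1
--     v = a[0]
--     for nxt in a[1:]:
--         d = v - nxt
--         take = c * d
--         if k <= take:
--             break
--         profit += c * (d * v - d * (d - 1) // 2)
--         k -= take
--         v = nxt
--         c += 1
--     q, r = divmod(k, c)
--     profit += c * (q * v - q * (q - 1) // 2) + r * (v - q)
--     return profit
-- ===== Notes on version B (the rewrite author's own statement) =====
-- stated objective: faster
-- what changed: Replaces the heap with B per-ticket pop/push operations by sorting the counts descending once and batching all picks at equal price levels with arithmetic-series (triangular-number) sums, so the work no longer depends on B.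
-- crash fix: On empty A with B >= 1, A raises IndexError (heappop from an empty heap); B returns 0 (no seats to sell). — e.g. on solve([], 1): A raises IndexError, B returns 0
import Mathlib
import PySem

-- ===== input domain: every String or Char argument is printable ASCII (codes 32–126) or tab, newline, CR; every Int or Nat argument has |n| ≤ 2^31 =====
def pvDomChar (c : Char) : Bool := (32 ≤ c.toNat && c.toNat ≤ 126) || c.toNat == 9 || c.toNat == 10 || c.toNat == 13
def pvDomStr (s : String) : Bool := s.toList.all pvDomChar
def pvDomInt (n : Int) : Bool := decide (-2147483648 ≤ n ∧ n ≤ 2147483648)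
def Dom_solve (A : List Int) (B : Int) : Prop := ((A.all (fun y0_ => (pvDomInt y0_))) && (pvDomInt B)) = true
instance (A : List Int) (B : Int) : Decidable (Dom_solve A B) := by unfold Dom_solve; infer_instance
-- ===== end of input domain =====

-- B replaces A's per-ticket heap loop (O(N + B log N)) by sort-then-batch arithmetic-series
-- sums over equal price levels (O(N log N), independent of B).

-- ===== PORT A =====
-- heapq is Python's standard library; it is ported by its contract: the heap is the list of
-- stored values, heappush appends, heappop removes and returns the minimum VALUE (exact: only
-- popped values reach the output, and heappop always yields the minimum; ties are equal Ints).
def solveLoopA : List Int → Int → Nat → Int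
  | _, profit, 0 => profit
  | H, profit, Nat.succ k =>
    match PySem.List.min? H (fun y => y) with
    | none => profit  -- heappop on an empty heap: IndexError in Python (excluded by Pre_)
    | some m =>
      let x := -1 * m
      solveLoopA ((H.erase m) ++ [-(x - 1)]) (profit + x) k

def solve (A : List Int) (B : Int) : Int :=
  let H := A.foldl (fun h a => h ++ [-1 * a]) []
  solveLoopA H 0 B.toNat

-- ===== PORT B =====
def altFinal (v c k profit : Int) : Int :=
  let q := PySem.Int.floordiv k c
  let r := PySem.Int.mod k c
  profit + c * (q * v - PySem.Int.floordiv (q * (q - 1)) 2) + r * (v - q)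

def altLoop : List Int → Int → Int → Int → Int → Int
  | [], _v, c, k, profit => altFinal _v c k profit
  | nxt :: rest, v, c, k, profit =>
    let d := v - nxt
    let take := c * d
    if k ≤ take then altFinal v c k profit
    else altLoop rest nxt (c + 1) (k - take) (profit + c * (d * v - PySem.Int.floordiv (d * (d - 1)) 2))

def solve_alt (A : List Int) (B : Int) : Int :=
  if B ≤ 0 then 0
  else
    match PySem.List.sorted A (fun y => y) true with
    | [] => 0
    | v :: rest => altLoop rest v 1 B 0

-- ===== PRECONDITION & SPEC =====
-- Pre_ excludes exactly the inputs where A raises IndexError: empty A with B ≥ 1 (heappop on an empty heap).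
def Pre_solve (A : List Int) (B : Int) : Prop := A ≠ [] ∨ B ≤ 0
instance (A : List Int) (B : Int) : Decidable (Pre_solve A B) := by unfold Pre_solve; infer_instance
def pvWitness_solve : List Int × Int := ([2, 3], 3)

-- On empty A with B ≥ 1, A raises IndexError (heappop from an empty heap); B returns 0 (no seats to sell).
def Raises_solve (A : List Int) (B : Int) : Prop := A = [] ∧ 1 ≤ B
instance (A : List Int) (B : Int) : Decidable (Raises_solve A B) := by unfold Raises_solve; infer_instance
def pvRaiseWitness_solve : List Int × Int := ([], 1)
def pvRaiseWitnessOut_solve : Int := 0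

def Spec_solve (A : List Int) (B : Int) (out : Int) : Prop := out = solve_alt A B
instance (A : List Int) (B : Int) (out : Int) : Decidable (Spec_solve A B out) := by unfold Spec_solve; infer_instance

-- ===== CLAIM (what is proved, stated in full; the proofs are below) =====
def Claim_equal_solve : Prop := ∀ (A : List Int) (B : Int), Dom_solve A B → Pre_solve A B → Spec_solve A B (solve A B)
def Claim_raises_solve : Prop := (∀ (A : List Int) (B : Int), Dom_solve A B → Raises_solve A B → ¬ Pre_solve A B) ∧ (Dom_solve (pvRaiseWitness_solve.1) (pvRaiseWitness_solve.2) ∧ Raises_solve (pvRaiseWitness_solve.1) (pvRaiseWitness_solve.2) ∧ solve_alt (pvRaiseWitness_solve.1) (pvRaiseWitness_solve.2) = pvRaiseWitnessOut_solve)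

-- ===== LEMMAS AND PROOFS =====

-- the greedy simulation in the positive (max) world: pick the maximum, re-insert max-1
def pvTri : Nat → Int
  | 0 => 0
  | Nat.succ q => pvTri q + q

theorem pvTri_floordiv (q : Nat) :
    PySem.Int.floordiv ((q : Int) * ((q : Int) - 1)) 2 = pvTri q := by
  induction q with
  | zero => decide
  | succ q ih =>
      have h : ((q + 1 : Nat) : Int) * (((q + 1 : Nat) : Int) - 1)
          = (q : Int) * ((q : Int) - 1) + (q : Int) * 2 := by push_cast; ring
      rw [show pvTri (q + 1) = pvTri q + q from rfl, h, ← ih,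
        PySem.Int.floordiv_eq_ediv_of_pos (by norm_num),
        PySem.Int.floordiv_eq_ediv_of_pos (by norm_num),
        Int.add_mul_ediv_right _ _ (by norm_num)]

theorem repl_shift (c : Nat) (x : Int) (l : List Int) :
    List.replicate c x ++ x :: l = List.replicate (c + 1) x ++ l := by
  rw [List.replicate_succ', List.append_assoc, List.singleton_append]

theorem foldl_push (l : List Int) (acc : List Int) :
    l.foldl (fun h a => h ++ [-1 * a]) acc = acc ++ l.map (fun a => -a) := by
  induction l generalizing acc with
  | nil => simp
  | cons a t ih =>
      rw [List.foldl_cons, ih, List.map_cons, List.append_assoc, List.singleton_append]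
      norm_num

theorem max?_eq_of_mem_of_bound {l : List Int} {v : Int} (hm : v ∈ l)
    (hb : ∀ x ∈ l, x ≤ v) : PySem.List.max? l (fun y => y) = some v := by
  cases h : PySem.List.max? l (fun y => y) with
  | none => exact absurd ((PySem.List.max?_eq_none_iff l _).mp h ▸ hm) (List.not_mem_nil)
  | some m =>
      have h1 : m ≤ v := hb m (PySem.List.max?_mem h)
      have h2 : v ≤ m := PySem.List.max?_isMax h v hm
      rw [le_antisymm h1 h2]

theorem min?_map_neg (l : List Int) :
    PySem.List.min? (l.map (fun a => -a)) (fun y => y)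
      = (PySem.List.max? l (fun y => y)).map (fun m => -m) := by
  cases hl : l with
  | nil =>
      rw [show (([] : List Int)).map (fun a => -a) = [] from rfl,
        (PySem.List.min?_eq_none_iff ([] : List Int) _).mpr rfl,
        (PySem.List.max?_eq_none_iff ([] : List Int) _).mpr rfl]
      rfl
  | cons a t =>
      cases h : PySem.List.max? (a :: t) (fun y => y) with
      | none => simp [(PySem.List.max?_eq_none_iff _ _).mp h] at *
      | some m =>
          cases h' : PySem.List.min? ((a :: t).map (fun a => -a)) (fun y => y) with
          | none =>
              have := (PySem.List.min?_eq_none_iff _ _).mp h'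
              simp at this
          | some m' =>
              have hmem : m' ∈ (a :: t).map (fun a => -a) := PySem.List.min?_mem h'
              obtain ⟨y, hy, hym⟩ := List.mem_map.mp hmem
              have h1 : m' ≤ -m := PySem.List.min?_isMin h' (-m)
                (List.mem_map.mpr ⟨m, PySem.List.max?_mem h, rfl⟩)
              have h2 : y ≤ m := PySem.List.max?_isMax h y hy
              simp only [Option.map_some]
              have : m' = -m := by omega
              rw [this]

def simu : List Int → Nat → Int
  | _, 0 => 0
  | l, Nat.succ k =>
    match PySem.List.max? l (fun y => y) with
    | none => 0
    | some m => m + simu ((l.erase m) ++ [m - 1]) k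

theorem max?_perm {l l' : List Int} (h : l.Perm l') :
    PySem.List.max? l (fun y => y) = PySem.List.max? l' (fun y => y) := by
  cases h1 : PySem.List.max? l (fun y => y) with
  | none =>
      have := (PySem.List.max?_eq_none_iff l _).mp h1
      subst this
      rw [(PySem.List.max?_eq_none_iff l' _).mpr h.nil_eq.symm]
  | some m =>
      exact (max?_eq_of_mem_of_bound (h.mem_iff.mp (PySem.List.max?_mem h1))
        (fun x hx => PySem.List.max?_isMax h1 x (h.mem_iff.mpr hx))).symm

theorem simu_perm : ∀ (k : Nat) {l l' : List Int}, l.Perm l' → simu l k = simu l' k := by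
  intro k
  induction k with
  | zero => intro l l' _; rfl
  | succ k ih =>
      intro l l' h
      simp only [simu]
      rw [max?_perm h]
      cases PySem.List.max? l' (fun y => y) with
      | none => rfl
      | some m => exact congrArg (m + ·) (ih ((h.erase m).append_right _))

theorem simu_level : ∀ (c : Nat) (v : Int) (l : List Int) (k : Nat),
    (∀ x ∈ l, x ≤ v) →
    simu (List.replicate c v ++ l) k =
      if k ≤ c then (k : Int) * v
      else (c : Int) * v + simu (List.replicate c (v - 1) ++ l) (k - c) := by
  intro c
  induction c with
  | zero =>
      intro v l k _
      cases k with
      | zero => simp [simu]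
      | succ k => simp
  | succ c ih =>
      intro v l k hb
      cases k with
      | zero => simp [simu]
      | succ k =>
          have hmax : PySem.List.max? (List.replicate (c + 1) v ++ l) (fun y => y) = some v := by
            apply max?_eq_of_mem_of_bound
            · exact List.mem_append_left _ (List.mem_replicate.mpr ⟨by omega, rfl⟩)
            · intro x hx
              rcases List.mem_append.mp hx with h | h
              · exact le_of_eq (List.eq_of_mem_replicate h)
              · exact hb x h
          have herase : (List.replicate (c + 1) v ++ l).erase v = List.replicate c v ++ l := by
            rw [List.replicate_succ, List.cons_append, List.erase_cons_head]
          simp only [simu, hmax, herase, List.append_assoc]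
          rw [ih v (l ++ [v - 1]) k (by
            intro x hx
            rcases List.mem_append.mp hx with h | h
            · exact hb x h
            · simp at h; omega)]
          by_cases hkc : k ≤ c
          · rw [if_pos hkc, if_pos (by omega)]
            push_cast; ring
          · rw [if_neg hkc, if_neg (by omega)]
            have hperm : (List.replicate c (v - 1) ++ (l ++ [v - 1])).Perm
                (List.replicate (c + 1) (v - 1) ++ l) := by
              calc (List.replicate c (v - 1) ++ (l ++ [v - 1])).Perm
                    (List.replicate c (v - 1) ++ ((v - 1) :: l)) :=
                      (List.perm_append_singleton _ _).append_left _
                _ = List.replicate (c + 1) (v - 1) ++ l := repl_shift c (v - 1) l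
            rw [simu_perm _ hperm]
            have : k + 1 - (c + 1) = k - c := by omega
            rw [this]
            push_cast; ring

theorem simu_partial : ∀ (k : Nat) (c : Nat) (v : Int) (l : List Int),
    0 < c → (∀ x ∈ l, x ≤ v - ((k / c : Nat) : Int)) →
    simu (List.replicate c v ++ l) k =
      (c : Int) * (((k / c : Nat) : Int) * v - pvTri (k / c))
        + ((k % c : Nat) : Int) * (v - ((k / c : Nat) : Int)) := by
  intro k
  induction k using Nat.strong_induction_on with
  | _ k ihk =>
      intro c v l hc hb
      by_cases hkc : k ≤ c
      · have hb' : ∀ x ∈ l, x ≤ v := by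
          intro x hx; have := hb x hx; have : (0:Int) ≤ ((k / c : Nat) : Int) := by positivity
          omega
        rw [simu_level c v l k hb', if_pos hkc]
        rcases Nat.lt_or_ge k c with h | h
        · rw [Nat.div_eq_of_lt h, Nat.mod_eq_of_lt h]
          simp [pvTri]
        · have hk : k = c := le_antisymm hkc h
          subst hk
          rw [Nat.div_self hc, Nat.mod_self]
          show (k:Int) * v = (k:Int) * (1 * v - pvTri 1) + 0 * (v - 1)
          show (k:Int) * v = (k:Int) * (1 * v - (pvTri 0 + (0:Nat))) + 0 * (v - 1)
          simp [pvTri]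
      · push_neg at hkc
        have hq : k / c = (k - c) / c + 1 := Nat.div_eq_sub_div hc (le_of_lt hkc)
        have hr : k % c = (k - c) % c := Nat.mod_eq_sub_mod (le_of_lt hkc)
        have hb0 : ∀ x ∈ l, x ≤ v := by
          intro x hx
          have hx1 := hb x hx
          have hx2 : (1:Int) ≤ ((k / c : Nat) : Int) := by
            have h1 : 1 ≤ k / c := Nat.one_le_div_iff hc |>.mpr (le_of_lt hkc)
            exact_mod_cast h1
          omega
        rw [simu_level c v l k hb0, if_neg (by omega)]
        rw [ihk (k - c) (by omega) c (v - 1) l hc (by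
          intro x hx
          have hx1 := hb x hx
          rw [hq] at hx1
          push_cast at hx1 ⊢
          omega)]
        have hqe : (((k - c) / c : Nat) : Int) = ((k / c : Nat) : Int) - 1 := by
          rw [hq]; push_cast; ring
        have hre : (((k - c) % c : Nat) : Int) = ((k % c : Nat) : Int) := by rw [hr]
        have htri : pvTri (k / c) = pvTri ((k - c) / c) + (((k - c) / c : Nat) : Int) := by
          rw [hq]; rfl
        rw [hqe, hre, htri, hqe]
        ring

theorem simu_phase : ∀ (d : Nat) (c : Nat) (v : Int) (l : List Int) (k : Nat),
    0 < c → c * d ≤ k → (∀ x ∈ l, x ≤ v - (d : Int)) →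
    simu (List.replicate c v ++ l) k =
      (c : Int) * ((d : Int) * v - pvTri d)
        + simu (List.replicate c (v - (d : Int)) ++ l) (k - c * d) := by
  intro d
  induction d with
  | zero => intro c v l k _ _ _; simp [pvTri]
  | succ d ih =>
      intro c v l k hc hk hb
      by_cases hkc : k ≤ c
      · have hd0 : d = 0 := by
          by_contra hd
          have h2 : 2 ≤ d + 1 := by omega
          have h3 : c * 2 ≤ c * (d + 1) := Nat.mul_le_mul_left c h2
          omega
        subst hd0
        have hkeq : k = c := by omega
        subst hkeq
        rw [simu_level k v l k (by intro x hx; have hx1 := hb x hx; push_cast at hx1 ⊢; omega),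
          if_pos le_rfl]
        have : k - k * 1 = 0 := by omega
        rw [this]
        show (k:Int) * v = (k:Int) * ((1:Int) * v - (pvTri 0 + ((0:Nat):Int))) + simu _ 0
        simp [simu, pvTri]
      · push_neg at hkc
        rw [simu_level c v l k (by
            intro x hx; have := hb x hx; push_cast at this ⊢; omega),
          if_neg (by omega)]
        rw [ih c (v - 1) l (k - c) hc (by
            have hmul : c * (d + 1) = c * d + c := by ring
            omega) (by
          intro x hx; have hx1 := hb x hx; push_cast at hx1 ⊢; omega)]
        have hst : v - 1 - (d : Int) = v - ((d + 1 : Nat) : Int) := by push_cast; ring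
        have hidx : k - c - c * d = k - c * (d + 1) := by ring_nf; omega
        rw [hst, hidx]
        have htri : pvTri (d + 1) = pvTri d + (d : Int) := rfl
        rw [htri]
        push_cast
        ring

theorem altFinal_eq (v : Int) (c k : Nat) (profit : Int) (hc : 0 < c) :
    altFinal v (c : Int) (k : Int) profit =
      profit + ((c : Int) * (((k / c : Nat) : Int) * v - pvTri (k / c))
        + ((k % c : Nat) : Int) * (v - ((k / c : Nat) : Int))) := by
  show profit + (c : Int) * ((PySem.Int.floordiv (k : Int) (c : Int)) * v
      - PySem.Int.floordiv ((PySem.Int.floordiv (k : Int) (c : Int))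
          * ((PySem.Int.floordiv (k : Int) (c : Int)) - 1)) 2)
      + (PySem.Int.mod (k : Int) (c : Int)) * (v - PySem.Int.floordiv (k : Int) (c : Int)) = _
  rw [PySem.Int.floordiv_natCast, PySem.Int.mod_natCast, pvTri_floordiv]
  ring

theorem pairwise_head_bound {v : Int} {rest : List Int}
    (h : List.Pairwise (fun a b => b ≤ a) (v :: rest)) : ∀ x ∈ rest, x ≤ v :=
  (List.pairwise_cons.mp h).1

theorem altLoop_eq : ∀ (rest : List Int) (v : Int) (c k : Nat) (profit : Int),
    0 < c → 0 < k → List.Pairwise (fun a b => b ≤ a) (v :: rest) →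
    altLoop rest v (c : Int) (k : Int) profit = profit + simu (List.replicate c v ++ rest) k := by
  intro rest
  induction rest with
  | nil =>
      intro v c k profit hc hk _
      rw [show altLoop [] v (c : Int) (k : Int) profit = altFinal v (c : Int) (k : Int) profit from rfl,
        altFinal_eq v c k profit hc,
        simu_partial k c v [] hc (by intro x hx; simp at hx)]
  | cons nxt rest' ih =>
      intro v c k profit hc hk hp
      have hnv : nxt ≤ v := pairwise_head_bound hp nxt (List.mem_cons_self)
      have hp' : List.Pairwise (fun a b => b ≤ a) (nxt :: rest') := (List.pairwise_cons.mp hp).2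
      have hbr : ∀ x ∈ nxt :: rest', x ≤ nxt := by
        intro x hx
        rcases List.mem_cons.mp hx with h | h
        · exact le_of_eq h
        · exact pairwise_head_bound hp' x h
      set d : Int := v - nxt with hd
      have hd0 : 0 ≤ d := by omega
      set dn : Nat := d.toNat with hdn
      have hdd : (dn : Int) = d := Int.toNat_of_nonneg hd0
      show (if (k : Int) ≤ (c : Int) * d then altFinal v (c : Int) (k : Int) profit
        else altLoop rest' nxt ((c : Int) + 1) ((k : Int) - (c : Int) * d)
          (profit + (c : Int) * (d * v - PySem.Int.floordiv (d * (d - 1)) 2))) = _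
      by_cases hcase : (k : Int) ≤ (c : Int) * d
      · rw [if_pos hcase, altFinal_eq v c k profit hc]
        rw [simu_partial k c v (nxt :: rest') hc (by
          intro x hx
          have h1 := hbr x hx
          have h2 : k ≤ c * dn := by
            have : (k : Int) ≤ (c : Int) * (dn : Int) := by rw [hdd]; exact hcase
            exact_mod_cast this
          have h3 : k / c ≤ dn := by
            calc k / c ≤ (c * dn) / c := Nat.div_le_div_right h2
              _ = dn := Nat.mul_div_cancel_left dn hc
          have h4 : ((k / c : Nat) : Int) ≤ (dn : Int) := by exact_mod_cast h3
          omega)]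
      · rw [if_neg hcase]
        push_neg at hcase
        have hck : c * dn < k := by
          have : (c : Int) * (dn : Int) < (k : Int) := by rw [hdd]; exact hcase
          exact_mod_cast this
        rw [show ((c : Int) + 1) = ((c + 1 : Nat) : Int) by push_cast; ring,
          show ((k : Int) - (c : Int) * d) = ((k - c * dn : Nat) : Int) by
            rw [← hdd]; push_cast [Nat.sub_add_cancel] ; omega]
        rw [ih nxt (c + 1) (k - c * dn) _ (by omega) (by omega) hp']
        rw [simu_phase dn c v (nxt :: rest') k hc (le_of_lt hck) (by
          intro x hx; have := hbr x hx; omega)]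
        have hst : v - (dn : Int) = nxt := by omega
        rw [hst, repl_shift c nxt rest']
        rw [show PySem.Int.floordiv (d * (d - 1)) 2 = pvTri dn by rw [← hdd]; exact pvTri_floordiv dn]
        rw [hdd]
        ring


theorem solveLoopA_eq : ∀ (k : Nat) (l : List Int) (profit : Int),
    solveLoopA (l.map (fun a => -a)) profit k = profit + simu l k := by
  intro k
  induction k with
  | zero => intro l profit; simp [solveLoopA, simu]
  | succ k ih =>
      intro l profit
      simp only [solveLoopA, simu]
      rw [min?_map_neg l]
      cases h : PySem.List.max? l (fun y => y) with
      | none => simp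
      | some m =>
          simp only [Option.map_some]
          have hneg : Function.Injective (fun a : Int => -a) := fun a b h => by
            simpa using congrArg Neg.neg h
          have herase : ((l.map (fun a => -a)).erase (-m)) = (l.erase m).map (fun a => -a) :=
            (List.map_erase hneg l).symm
          have hx : -1 * -m = m := by ring
          rw [hx, herase, show [-(m - 1)] = List.map (fun a : Int => -a) [m - 1] from rfl,
            ← List.map_append, ih]
          ring

-- ===== VERDICT (by name: the statement is the Claim_ definition above) =====
theorem solve_spec : Claim_equal_solve := by
  intro A B _ hpre
  show solve A B = solve_alt A B
  by_cases hB : B ≤ 0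
  · simp [solve, solve_alt, hB, Int.toNat_of_nonpos hB, solveLoopA]
  · push_neg at hB
    have hA : A ≠ [] := by
      rcases hpre with h | h
      · exact h
      · omega
    have hkpos : 0 < B.toNat := by omega
    have hBt : ((B.toNat : Nat) : Int) = B := Int.toNat_of_nonneg (le_of_lt hB)
    cases hs : PySem.List.sorted A (fun y => y) true with
    | nil => exact absurd ((PySem.List.sorted_eq_nil_iff A _ true).mp hs) hA
    | cons v rest =>
        have hperm : A.Perm (v :: rest) := (hs ▸ PySem.List.sorted_perm A (fun y => y) true).symm
        have hpw : List.Pairwise (fun a b => b ≤ a) (v :: rest) := by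
          have := PySem.List.sorted_pairwise_rev A (fun y => y)
          rwa [hs] at this
        have hleft : solve A B = simu A B.toNat := by
          show solveLoopA (A.foldl (fun h a => h ++ [-1 * a]) []) 0 B.toNat = _
          rw [foldl_push A [], List.nil_append, solveLoopA_eq]
          ring
        have hright : solve_alt A B = altLoop rest v 1 B 0 := by
          unfold solve_alt
          rw [if_neg (by omega), hs]
        have halt := altLoop_eq rest v 1 B.toNat 0 Nat.one_pos hkpos hpw
        rw [Nat.cast_one, hBt] at halt
        rw [hleft, hright, halt, simu_perm B.toNat hperm]
        simp

@[simp]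
theorem solve_raises : Claim_raises_solve := by
  unfold Claim_raises_solve
  exact ⟨by rintro A B _ ⟨hA, hB⟩ (h | h); exacts [h hA, by omega], by decide⟩
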